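-- pv_equiv track=rewrite | github.com/0xC1pher/mcp-hub-new | core/shared/toon_serializer.py | encode_dependencies
-- ===== SOURCE A (Python) =====
-- from typing import Dict, List, Any, Optional
--
-- def encode_dependencies(deps: Dict[str, List[str]], max_deps: int = 30) -> str:
--     """
--     Encode dependency graph to TOON format
--
--     Args:
--         deps: Dict mapping entity -> list of dependencies
--         max_deps: Maximum dependencies to include
--
--     Returns:
--         TOON formatted string
--     """
--     if not deps:
--         return "No dependencies tracked"
--
--     # Flatten to rows
--     rows = []
--     for entity, calls in deps.items():
--         for call in calls:
--             rows.append(f"{entity},{call},calls")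
--             if len(rows) >= max_deps:
--                 break
--         if len(rows) >= max_deps:
--             break
--
--     if not rows:
--         return "No dependencies tracked"
--
--     # Build TOON
--     header = f"dependencies[{len(rows)}]{{from,to,type}}:"
--     return header + "\n" + "\n".join(rows)
-- ===== SOURCE B (Python) =====
-- def encode_dependencies(deps, max_deps=30):
--     if not deps:
--         return "No dependencies tracked"
--     rows = [f"{entity},{call},calls"
--             for entity, calls in deps.items()
--             for call in calls][:max(max_deps, 0)]
--     if not rows:
--         return "No dependencies tracked"
--     return f"dependencies[{len(rows)}]{{from,to,type}}:" + "\n" + "\n".join(rows)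
-- ===== Notes on version B (the rewrite author's own statement) =====
-- stated objective: idiomatic
-- what changed: Replaces A's nested loops with double break and an incremental row counter by a flat flatten comprehension truncated once with a slice [:max(max_deps,0)].
-- intended difference: For max_deps <= 0 with a nonempty dict whose first entity has a nonempty call list, A still emits one row (it appends before checking the cap) while B returns 'No dependencies tracked', the intended meaning of a non-positive cap. — e.g. on encode_dependencies([("a", ["b"])], 0): A returns "dependencies[1]{from,to,type}:\na,b,calls", B returns "No dependencies tracked"
import Mathlib
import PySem

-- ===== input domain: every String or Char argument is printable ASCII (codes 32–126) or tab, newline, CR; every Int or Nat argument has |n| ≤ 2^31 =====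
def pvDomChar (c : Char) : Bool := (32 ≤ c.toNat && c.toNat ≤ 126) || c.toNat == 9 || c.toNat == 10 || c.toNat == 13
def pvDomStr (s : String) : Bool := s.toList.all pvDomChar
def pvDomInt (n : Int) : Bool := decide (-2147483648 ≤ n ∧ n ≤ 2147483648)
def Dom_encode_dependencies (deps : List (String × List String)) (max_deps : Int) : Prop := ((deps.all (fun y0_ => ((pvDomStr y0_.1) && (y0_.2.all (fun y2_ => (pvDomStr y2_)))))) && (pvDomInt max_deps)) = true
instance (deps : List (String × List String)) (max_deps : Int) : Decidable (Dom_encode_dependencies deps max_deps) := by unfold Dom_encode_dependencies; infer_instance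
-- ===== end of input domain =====

-- B replaces A's nested loops with double break by a flat flatten-then-truncate pipeline (idiomatic);
-- for max_deps ≤ 0 A's append-before-check still emits one row, B emits none (see D_ below).

-- ===== PORT A =====
-- one row as Python's f-string builds it
def pvRow (entity call : String) : String := entity ++ "," ++ call ++ ",calls"

-- inner 'for call in calls' loop with its 'break'
def pvInnerA (entity : String) (max_deps : Int) : List String → List String → List String
  | [], rows => rows
  | call :: calls, rows =>
    let rows := rows ++ [pvRow entity call]
    if (rows.length : Int) ≥ max_deps then rows else pvInnerA entity max_deps calls rows

-- outer 'for entity, calls in deps.items()' loop with its 'break'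
def pvOuterA (max_deps : Int) : List (String × List String) → List String → List String
  | [], rows => rows
  | (entity, calls) :: rest, rows =>
    let rows := pvInnerA entity max_deps calls rows
    if (rows.length : Int) ≥ max_deps then rows else pvOuterA max_deps rest rows

def encode_dependencies (deps : List (String × List String)) (max_deps : Int) : String :=
  if deps = [] then "No dependencies tracked"
  else
    let rows := pvOuterA max_deps deps []
    if rows = [] then "No dependencies tracked"
    else "dependencies[" ++ PySem.Int.toStr (rows.length : Int) ++ "]{from,to,type}:"
           ++ "\n" ++ String.intercalate "\n" rows

-- ===== PORT B =====
-- flatten comprehension then the slice [:max(max_deps,0)]; the cap is ≥ 0 so the slice is List.take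
def encode_dependencies_alt (deps : List (String × List String)) (max_deps : Int) : String :=
  if deps = [] then "No dependencies tracked"
  else
    let rows := (deps.flatMap (fun p => p.2.map (fun call => pvRow p.1 call))).take (max max_deps 0).toNat
    if rows = [] then "No dependencies tracked"
    else "dependencies[" ++ PySem.Int.toStr (rows.length : Int) ++ "]{from,to,type}:"
           ++ "\n" ++ String.intercalate "\n" rows

-- ===== PRECONDITION & SPEC =====
-- On max_deps ≤ 0 with a nonempty dict whose first entity has a nonempty call list, A still emits one
-- row (it appends before checking the cap) while B returns "No dependencies tracked", the intended
-- meaning of a non-positive cap.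
def D_encode_dependencies (deps : List (String × List String)) (max_deps : Int) : Prop :=
  max_deps ≤ 0 ∧ deps ≠ [] ∧ (deps.headD ("", [])).2 ≠ []
instance (deps : List (String × List String)) (max_deps : Int) : Decidable (D_encode_dependencies deps max_deps) := by unfold D_encode_dependencies; infer_instance

def Spec_encode_dependencies (deps : List (String × List String)) (max_deps : Int) (out : String) : Prop := ¬ D_encode_dependencies deps max_deps → out = encode_dependencies_alt deps max_deps
instance (deps : List (String × List String)) (max_deps : Int) (out : String) : Decidable (Spec_encode_dependencies deps max_deps out) := by unfold Spec_encode_dependencies; infer_instance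

def pvDiffWitness_encode_dependencies : (List (String × List String)) × Int := ([("a", ["b"])], 0)
def pvDiffWitnessOut_encode_dependencies : String × String :=
  ("dependencies[1]{from,to,type}:\na,b,calls", "No dependencies tracked")

-- ===== CLAIM (what is proved, stated in full; the proofs are below) =====
def Claim_unchanged_encode_dependencies : Prop := ∀ (deps : List (String × List String)) (max_deps : Int), Dom_encode_dependencies deps max_deps → Spec_encode_dependencies deps max_deps (encode_dependencies deps max_deps)
def Claim_changed_encode_dependencies : Prop := Dom_encode_dependencies (pvDiffWitness_encode_dependencies.1) (pvDiffWitness_encode_dependencies.2) ∧ D_encode_dependencies (pvDiffWitness_encode_dependencies.1) (pvDiffWitness_encode_dependencies.2) ∧ encode_dependencies (pvDiffWitness_encode_dependencies.1) (pvDiffWitness_encode_dependencies.2) = pvDiffWitnessOut_encode_dependencies.1 ∧ encode_dependencies_alt (pvDiffWitness_encode_dependencies.1) (pvDiffWitness_encode_dependencies.2) = pvDiffWitnessOut_encode_dependencies.2 ∧ pvDiffWitnessOut_encode_dependencies.1 ≠ pvDiffWitnessOut_encode_dependencies.2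
def Claim_exact_encode_dependencies : Prop := ∀ (deps : List (String × List String)) (max_deps : Int), Dom_encode_dependencies deps max_deps → D_encode_dependencies deps max_deps → encode_dependencies deps max_deps ≠ encode_dependencies_alt deps max_deps

-- ===== LEMMAS AND PROOFS =====

-- the flatten comprehension
def pvFlat (deps : List (String × List String)) : List String :=
  deps.flatMap (fun p => p.2.map (fun call => pvRow p.1 call))

-- inner loop = append-then-truncate, under the invariant rows.length < max_deps
lemma pvInnerA_eq (entity : String) (m : Int) (calls : List String) :
    ∀ rows : List String, (rows.length : Int) < m →
      pvInnerA entity m calls rows = (rows ++ calls.map (pvRow entity)).take m.toNat := by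
  induction calls with
  | nil =>
    intro rows h
    have hlen : rows.length ≤ m.toNat := by omega
    simp [pvInnerA, List.take_of_length_le hlen]
  | cons c cs ih =>
    intro rows h
    by_cases hb : ((rows ++ [pvRow entity c]).length : Int) ≥ m
    · have hm : m.toNat = rows.length + 1 := by simp at hb; omega
      simp only [pvInnerA, if_pos hb]
      have hsplit : rows ++ (c :: cs).map (pvRow entity)
          = (rows ++ [pvRow entity c]) ++ cs.map (pvRow entity) := by simp
      rw [hsplit, List.take_append_of_le_length (by simp [hm]),
        List.take_of_length_le (by simp [hm])]
    · simp only [pvInnerA, if_neg hb]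
      rw [ih _ (by simp at hb ⊢; omega)]
      simp

lemma pvOuterA_eq (m : Int) (deps : List (String × List String)) :
    ∀ rows : List String, (rows.length : Int) < m →
      pvOuterA m deps rows = (rows ++ pvFlat deps).take m.toNat := by
  induction deps with
  | nil =>
    intro rows h
    have hlen : rows.length ≤ m.toNat := by omega
    simp [pvOuterA, pvFlat, List.take_of_length_le hlen]
  | cons p rest ih =>
    intro rows h
    obtain ⟨entity, calls⟩ := p
    have hin := pvInnerA_eq entity m calls rows h
    have hlen2 : (pvInnerA entity m calls rows).length
        = min m.toNat (rows ++ calls.map (pvRow entity)).length := by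
      rw [hin]; simp
    by_cases hb : ((pvInnerA entity m calls rows).length : Int) ≥ m
    · have hge : m.toNat ≤ (rows ++ calls.map (pvRow entity)).length := by
        rw [hlen2] at hb; omega
      have hb' : ((List.take m.toNat (rows ++ calls.map (pvRow entity))).length : Int) ≥ m :=
        hin ▸ hb
      simp only [pvOuterA, hin, pvFlat, List.flatMap_cons, ← List.append_assoc]
      rw [if_pos hb', List.take_append_of_le_length hge]
    · have hlt : ((pvInnerA entity m calls rows).length : Int) < m := by omega
      have hL : (rows ++ calls.map (pvRow entity)).length ≤ m.toNat := by
        rw [hlen2] at hlt; omega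
      have hrows' : pvInnerA entity m calls rows = rows ++ calls.map (pvRow entity) := by
        rw [hin, List.take_of_length_le hL]
      simp only [pvOuterA, if_neg hb]
      rw [ih _ hlt, hrows']
      simp [pvFlat, List.flatMap_cons, List.append_assoc]

-- the built TOON string can never equal the sentinel (their lengths differ)
lemma pvHeader_ne (n : Int) (rows : List String) :
    "dependencies[" ++ PySem.Int.toStr n ++ "]{from,to,type}:" ++ "\n"
      ++ String.intercalate "\n" rows ≠ "No dependencies tracked" := by
  intro h
  have hl := congrArg String.length h
  have h1 : "dependencies[".length = 13 := rfl
  have h2 : "]{from,to,type}:".length = 16 := rfl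
  have h3 : "\n".length = 1 := rfl
  have h4 : "No dependencies tracked".length = 23 := rfl
  simp only [String.length_append, h1, h2, h3, h4] at hl
  omega

theorem encode_dependencies_spec : Claim_unchanged_encode_dependencies := by
  intro deps m _ hnd
  show encode_dependencies deps m = encode_dependencies_alt deps m
  by_cases hdeps : deps = []
  · simp [encode_dependencies, encode_dependencies_alt, hdeps]
  · by_cases hm : 1 ≤ m
    · have hmax : (max m 0).toNat = m.toNat := by omega
      have h := pvOuterA_eq m deps [] (by simpa using hm)
      simp only [List.nil_append] at h
      simp only [encode_dependencies, encode_dependencies_alt, if_neg hdeps, h, hmax, pvFlat]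
    · -- m ≤ 0: ¬D gives that the first entity's call list is empty, so A breaks with no rows
      have hm0 : m ≤ 0 := by omega
      obtain ⟨⟨entity, calls⟩, rest, rfl⟩ : ∃ p rest, deps = p :: rest := by
        cases deps with
        | nil => exact absurd rfl hdeps
        | cons p rest => exact ⟨p, rest, rfl⟩
      have hcalls : calls = [] := by
        by_contra hc
        exact hnd ⟨hm0, by simp, by simpa using hc⟩
      subst hcalls
      have hmax : (max m 0).toNat = 0 := by omega
      simp [encode_dependencies, encode_dependencies_alt, pvOuterA, pvInnerA, hm0]

theorem encode_dependencies_changed : Claim_changed_encode_dependencies := by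
  unfold Claim_changed_encode_dependencies; decide

theorem encode_dependencies_tight : Claim_exact_encode_dependencies := by
  intro deps m _ hD
  obtain ⟨hm0, hne, hhead⟩ := hD
  obtain ⟨⟨entity, calls⟩, rest, rfl⟩ : ∃ p rest, deps = p :: rest := by
    cases deps with
    | nil => exact absurd rfl hne
    | cons p rest => exact ⟨p, rest, rfl⟩
  obtain ⟨c, cs, rfl⟩ : ∃ c cs, calls = c :: cs := by
    cases calls with
    | nil => simp at hhead
    | cons c cs => exact ⟨c, cs, rfl⟩
  have h1 : pvInnerA entity m (c :: cs) [] = [pvRow entity c] := by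
    simp only [pvInnerA]
    rw [if_pos (by simp only [List.nil_append, List.length_cons, List.length_nil]; omega)]
    simp
  have h2 : pvOuterA m ((entity, c :: cs) :: rest) [] = [pvRow entity c] := by
    simp only [pvOuterA, h1]
    rw [if_pos (by simp only [List.length_cons, List.length_nil]; omega)]
  have hmax : (max m 0).toNat = 0 := by omega
  have hA : encode_dependencies ((entity, c :: cs) :: rest) m
      = "dependencies[" ++ PySem.Int.toStr 1 ++ "]{from,to,type}:" ++ "\n"
          ++ String.intercalate "\n" [pvRow entity c] := by
    simp [encode_dependencies, h2]
  have hB : encode_dependencies_alt ((entity, c :: cs) :: rest) m = "No dependencies tracked" := by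
    simp [encode_dependencies_alt, hmax]
  rw [hA, hB]
  exact pvHeader_ne 1 [pvRow entity c]
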